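-- pv_equiv track=rewrite | github.com/kalai2033/End_to_End_OCR_model_using_Flask_and_Docker | mergedModel/extracttext.py | common_data
-- ===== SOURCE A (Python) =====
-- def common_data(list1, list2):
--     result = False
--     count=0
--     threshold = (0.75 * (min(len(list1),len(list2))))
--     for x in list1:
--         for y in list2:
--
--             # if one common
--             if x == y:
--                 count+=1
--
--
--     if count > threshold:
--         result = True
--
--     return result
-- ===== SOURCE B (Python) =====
-- def common_data(list1, list2):
--     # One pass over each list builds a frequency dict; the matching-pair
--     # count is the sum of count1[v]*count2[v]; compare in exact integer
--     # arithmetic: count > 0.75*min(len) iff 4*count > 3*min(len).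
--     c1 = {}
--     for x in list1:
--         c1[x] = c1.get(x, 0) + 1
--     c2 = {}
--     for y in list2:
--         c2[y] = c2.get(y, 0) + 1
--     count = 0
--     for k, v in c1.items():
--         count += v * c2.get(k, 0)
--     return 4 * count > 3 * min(len(list1), len(list2))
-- ===== Notes on version B (the rewrite author's own statement) =====
-- stated objective: faster
-- what changed: Replaces the nested O(n*m) pair scan with one-pass frequency dicts on each list, summing count1[v]*count2[v] over dict1's keys, and compares against the 75% threshold in exact integer arithmetic (4*count > 3*min).
import Mathlib
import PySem

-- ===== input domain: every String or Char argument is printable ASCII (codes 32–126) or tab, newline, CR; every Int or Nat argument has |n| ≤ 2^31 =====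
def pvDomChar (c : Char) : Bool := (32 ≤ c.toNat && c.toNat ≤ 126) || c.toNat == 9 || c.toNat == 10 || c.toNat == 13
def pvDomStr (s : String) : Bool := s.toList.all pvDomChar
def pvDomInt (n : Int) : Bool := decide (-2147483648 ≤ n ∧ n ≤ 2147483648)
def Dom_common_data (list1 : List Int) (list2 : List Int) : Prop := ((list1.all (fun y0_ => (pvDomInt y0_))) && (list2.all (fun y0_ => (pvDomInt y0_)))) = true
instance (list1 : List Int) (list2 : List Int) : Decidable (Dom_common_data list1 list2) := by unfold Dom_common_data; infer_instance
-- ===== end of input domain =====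

-- B replaces A's nested pair scan with one-pass frequency dicts (O(n+m) vs O(n*m), measured faster).
-- The float comparison 'count > 0.75*min(len1,len2)' is exact in Python here (0.75*m is an exact
-- float for these sizes, int/float comparison is exact), so both ports state it as 4*count > 3*min.

-- ===== PORT A =====
def common_data (list1 : List Int) (list2 : List Int) : Bool :=
  let result := false
  let count : Int :=
    list1.foldl (fun c x => list2.foldl (fun c y => if x = y then c + 1 else c) c) 0
  -- 'count > 0.75 * min(len1,len2)' written exactly as 4*count > 3*min (see header comment)
  if 4 * count > 3 * (min list1.length list2.length : Int) then true else result

-- ===== PORT B =====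
def common_data_alt (list1 : List Int) (list2 : List Int) : Bool :=
  let c1 : PySem.Dict Int Int :=
    list1.foldl (fun d x => d.insert x (d.getD x 0 + 1)) PySem.Dict.empty
  let c2 : PySem.Dict Int Int :=
    list2.foldl (fun d y => d.insert y (d.getD y 0 + 1)) PySem.Dict.empty
  let count : Int := c1.items.foldl (fun s p => s + p.2 * c2.getD p.1 0) 0
  decide (4 * count > 3 * (min list1.length list2.length : Int))

-- ===== PRECONDITION & SPEC =====
def Spec_common_data (list1 : List Int) (list2 : List Int) (out : Bool) : Prop := out = common_data_alt list1 list2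
instance (list1 : List Int) (list2 : List Int) (out : Bool) : Decidable (Spec_common_data list1 list2 out) := by unfold Spec_common_data; infer_instance

-- ===== CLAIM (what is proved, stated in full; the proofs are below) =====
def Claim_equal_common_data : Prop := ∀ (list1 : List Int) (list2 : List Int), Dom_common_data list1 list2 → Spec_common_data list1 list2 (common_data list1 list2)

-- ===== LEMMAS AND PROOFS =====

-- A's nested loop computes the sum over list1 of each element's count in list2.
theorem commonA_count (list1 list2 : List Int) :
    list1.foldl (fun c x => list2.foldl (fun c y => if x = y then c + 1 else c) c) 0
      = (list1.map (fun x => (list2.count x : Int))).sum := by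
  have hinner : ∀ (x : Int) (c : Int),
      list2.foldl (fun c y => if x = y then c + 1 else c) c = c + (list2.count x : Int) := by
    intro x c
    have h := PySem.List.foldl_count_if (fun y => x == y) list2 c
    simp only [beq_iff_eq] at h
    rw [h]
    congr 1
    norm_cast
    rw [List.count]
    apply List.countP_congr
    intro y _
    simp only [beq_iff_eq]
    exact eq_comm
  have houter := PySem.List.foldl_congr_mem list1 _
      (fun c x => c + ((list2.count x : Int))) 0 (fun c x _ => hinner x c)
  rw [houter, PySem.List.foldl_add]; simp

-- Summing count1(k) * g k over the distinct elements of l1 is summing g over l1.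
theorem key_sum (l1 : List Int) (g : Int → Int) :
    ((PySem.Set.ofList l1).map (fun k => (l1.count k : Int) * g k)).sum
      = (l1.map g).sum := by
  have hnd : (PySem.Set.ofList l1).Nodup := PySem.Set.nodup_ofList l1
  have htf : (PySem.Set.ofList l1).toFinset = l1.toFinset := by
    ext x; simp [PySem.Set.mem_ofList]
  rw [← List.sum_toFinset _ hnd, htf, Finset.sum_list_map_count]
  apply Finset.sum_congr rfl
  intro x _
  simp

-- B's dict sum equals the same quantity.
theorem commonB_count (list1 list2 : List Int) :
    ((list1.foldl (fun d x => d.insert x (d.getD x 0 + 1)) (PySem.Dict.empty : PySem.Dict Int Int)).items).foldl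
        (fun s p => s + p.2 * (list2.foldl (fun d y => d.insert y (d.getD y 0 + 1)) (PySem.Dict.empty : PySem.Dict Int Int)).getD p.1 0) 0
      = (list1.map (fun x => (list2.count x : Int))).sum := by
  rw [PySem.Dict.foldl_insert_getD_add_one_eq_counter, PySem.Dict.foldl_insert_getD_add_one_eq_counter,
      PySem.Dict.items_counter]
  rw [PySem.List.foldl_add, zero_add, List.map_map]
  have h2 : ((fun p : Int × Int => p.2 * (PySem.Dict.counter list2).getD p.1 0)
        ∘ fun k => (k, (list1.count k : Int)))
      = fun k => (list1.count k : Int) * (list2.count k : Int) := by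
    funext k
    simp [Function.comp, PySem.Dict.getD_counter]
  rw [h2, key_sum list1 (fun x => (list2.count x : Int))]

-- ===== VERDICT (by name: the statement is the Claim_ definition above) =====
theorem common_data_spec : Claim_equal_common_data := by
  intro list1 list2 _
  unfold Spec_common_data common_data common_data_alt
  simp only [commonA_count, commonB_count]
  split_ifs with h <;> simp [h]
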